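-- pv_equiv track=rewrite | github.com/MrBrantCode/unitest_baseline | mut_generate/mist_train_cf/cf_58894/solution.py | multiply_fibonacci
-- ===== SOURCE A (Python) =====
-- def multiply_fibonacci(M, P):
--     # Initialize Fibonacci sequence
--     fib = [0, 1]
--
--     # Generate Fibonacci sequence up to M
--     while fib[-1] + fib[-2] <= M:
--         fib.append(fib[-1] + fib[-2])
--
--     # Find Fibonacci numbers greater than P and multiply them
--     result = 1
--     for num in fib:
--         if num > P:
--             result *= num
--
--     return result
-- ===== SOURCE B (Python) =====
-- def multiply_fibonacci(M, P):
--     # The leading 0 entry makes the whole product zero whenever P < 0.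
--     if P < 0:
--         return 0
--     # Skip phase: advance past the entries 1, 1, 2, 3, ... that are <= P
--     # (each contributes a factor 1, so nothing is multiplied here).
--     a, b = 0, 1
--     while b <= P and a + b <= M:
--         a, b = b, a + b
--     if b <= P:
--         return 1
--     # Multiply phase: the sequence is nondecreasing from here on, so every
--     # remaining entry exceeds P and is multiplied unconditionally.
--     result = b
--     while a + b <= M:
--         a, b = b, a + b
--         result *= b
--     return result
-- ===== Notes on version B (the rewrite author's own statement) =====
-- stated objective: alternative
-- what changed: B replaces A's generate-a-list-then-filter-product with a three-phase scheme: a closed-form zero answer for P < 0, a skip loop that advances past entries <= P without multiplying, and an unconditional multiply loop with no per-element comparison, justified by monotonicity of the sequence.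
import Mathlib
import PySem

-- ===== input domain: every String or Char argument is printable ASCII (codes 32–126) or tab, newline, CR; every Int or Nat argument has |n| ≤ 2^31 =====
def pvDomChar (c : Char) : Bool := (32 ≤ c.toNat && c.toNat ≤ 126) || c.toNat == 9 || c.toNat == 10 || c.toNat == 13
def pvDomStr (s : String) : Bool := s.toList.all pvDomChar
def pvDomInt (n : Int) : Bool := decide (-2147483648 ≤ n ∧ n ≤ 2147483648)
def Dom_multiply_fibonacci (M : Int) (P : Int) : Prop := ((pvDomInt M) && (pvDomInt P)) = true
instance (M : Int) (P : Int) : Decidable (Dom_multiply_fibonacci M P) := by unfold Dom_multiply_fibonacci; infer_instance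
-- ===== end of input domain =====

-- B replaces A's generate-a-list-then-filter-product with a closed-form zero case (P < 0),
-- a skip loop past entries ≤ P, and an unconditional multiply loop (alternative decomposition).
-- Both loop ports use a Nat fuel (M.toNat + 1) purely as a totality device: each iteration
-- raises a + b by at least 1 from 1, so the guard a + b ≤ M fails before the fuel runs out.

-- ===== PORT A =====
-- A's while loop: extend `fib` while fib[-1]+fib[-2] ≤ M; a, b are the last two elements.
def fibGenA (M : Int) : Nat → List Int → Int → Int → List Int
  | 0, fib, _, _ => fib
  | fuel + 1, fib, a, b =>
      if a + b ≤ M then fibGenA M fuel (fib ++ [a + b]) b (a + b) else fib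

def multiply_fibonacci (M : Int) (P : Int) : Int :=
  let fib := fibGenA M (M.toNat + 1) [0, 1] 0 1
  fib.foldl (fun result num => if num > P then result * num else result) 1

-- ===== PORT B =====
-- B's second while loop: multiply every further entry unconditionally.
def fibMulB (M : Int) : Nat → Int → Int → Int → Int
  | 0, result, _, _ => result
  | fuel + 1, result, a, b =>
      if a + b ≤ M then fibMulB M fuel (result * (a + b)) b (a + b) else result

-- B's first while loop (skip entries ≤ P), then `if b <= P: return 1` and the
-- multiply phase starting from result = b.
def fibSkipB (M P : Int) : Nat → Int → Int → Int
  | 0, a, b => if b ≤ P then 1 else fibMulB M 0 b a b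
  | fuel + 1, a, b =>
      if b ≤ P ∧ a + b ≤ M then fibSkipB M P fuel b (a + b)
      else if b ≤ P then 1
      else fibMulB M (fuel + 1) b a b

def multiply_fibonacci_alt (M : Int) (P : Int) : Int :=
  if P < 0 then 0
  else fibSkipB M P (M.toNat + 1) 0 1

-- ===== PRECONDITION & SPEC =====
def Spec_multiply_fibonacci (M : Int) (P : Int) (out : Int) : Prop := out = multiply_fibonacci_alt M P
instance (M : Int) (P : Int) (out : Int) : Decidable (Spec_multiply_fibonacci M P out) := by unfold Spec_multiply_fibonacci; infer_instance

-- ===== CLAIM =====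
def Claim_equal_multiply_fibonacci : Prop := ∀ (M : Int) (P : Int), Dom_multiply_fibonacci M P → Spec_multiply_fibonacci M P (multiply_fibonacci M P)

-- ===== LEMMAS AND PROOFS =====
-- Proof-side helper: A's filtered product streamed over the generation states.
def streamA (M P : Int) : Nat → Int → Int → Int → Int
  | 0, result, _, _ => result
  | fuel + 1, result, a, b =>
      if a + b ≤ M then
        streamA M P fuel (if a + b > P then result * (a + b) else result) b (a + b)
      else result

-- Folding A's product over the generated list equals the streamed product.
theorem fibGenA_foldl (M P : Int) : ∀ (fuel : Nat) (fib : List Int) (a b r : Int),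
    (fibGenA M fuel fib a b).foldl (fun result num => if num > P then result * num else result) r
      = streamA M P fuel (fib.foldl (fun result num => if num > P then result * num else result) r) a b := by
  intro fuel
  induction fuel with
  | zero => intro fib a b r; rfl
  | succ f ih =>
      intro fib a b r
      rw [fibGenA, streamA]
      by_cases hg : a + b ≤ M
      · rw [if_pos hg, if_pos hg, ih]
        simp [List.foldl_append]
      · rw [if_neg hg, if_neg hg]

-- A zero accumulator stays zero.
theorem streamA_zero (M P : Int) : ∀ (fuel : Nat) (r a b : Int), r = 0 →
    streamA M P fuel r a b = 0 := by
  intro fuel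
  induction fuel with
  | zero => intro r a b hr; exact hr
  | succ f ih =>
      intro r a b hr
      rw [streamA]
      by_cases hg : a + b ≤ M
      · rw [if_pos hg]
        exact ih _ _ _ (by subst hr; split_ifs <;> simp)
      · rw [if_neg hg]
        exact hr

-- Multiply phase: once 0 ≤ a and P < b, every further entry a+b exceeds P, so the
-- condition in streamA always fires and it coincides with fibMulB.
theorem streamA_mul (M P : Int) : ∀ (fuel : Nat) (r a b : Int), 0 ≤ a → 0 < b → P < b →
    streamA M P fuel r a b = fibMulB M fuel r a b := by
  intro fuel
  induction fuel with
  | zero => intro r a b _ _ _; rfl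
  | succ f ih =>
      intro r a b ha hb0 hb
      rw [streamA, fibMulB]
      by_cases hg : a + b ≤ M
      · rw [if_pos hg, if_pos hg]
        rw [if_pos (show a + b > P by omega)]
        exact ih _ _ _ (by omega) (by omega) (by omega)
      · rw [if_neg hg, if_neg hg]

-- Once the pending entry exceeds P, B's skip loop hands over to the multiply loop at once.
theorem fibSkipB_gt (M P : Int) : ∀ (fuel : Nat) (a b : Int), P < b →
    fibSkipB M P fuel a b = fibMulB M fuel b a b := by
  intro fuel a b hb
  cases fuel with
  | zero => rw [fibSkipB, if_neg (by omega)]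
  | succ f =>
      rw [fibSkipB, if_neg (by omega), if_neg (by omega)]

-- Skip phase: while b ≤ P, streaming from accumulator 1 equals B's skip loop.
theorem streamA_skip (M P : Int) : ∀ (fuel : Nat) (a b : Int), 0 ≤ a → 0 < b → b ≤ P →
    streamA M P fuel 1 a b = fibSkipB M P fuel a b := by
  intro fuel
  induction fuel with
  | zero => intro a b _ _ hb; rw [streamA, fibSkipB, if_pos hb]
  | succ f ih =>
      intro a b ha hb0 hb
      rw [streamA, fibSkipB]
      by_cases hg : a + b ≤ M
      · rw [if_pos hg, if_pos (show b ≤ P ∧ a + b ≤ M from ⟨hb, hg⟩)]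
        by_cases hc : a + b > P
        · rw [if_pos hc, streamA_mul M P f _ _ _ (by omega) (by omega) hc,
              fibSkipB_gt M P f _ _ hc, one_mul]
        · rw [if_neg hc]
          exact ih _ _ (by omega) (by omega) (by omega)
      · rw [if_neg hg, if_neg (show ¬ (b ≤ P ∧ a + b ≤ M) by omega), if_pos hb]

-- ===== VERDICT =====
theorem multiply_fibonacci_spec : Claim_equal_multiply_fibonacci := by
  intro M P _
  unfold Spec_multiply_fibonacci multiply_fibonacci multiply_fibonacci_alt
  rw [fibGenA_foldl]
  by_cases hP : P < 0
  · -- the entry 0 zeroes the accumulator before streaming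
    rw [if_pos hP]
    have h01 : ([0, 1].foldl (fun result num => if num > P then result * num else result) (1 : Int)) = 0 := by
      simp [List.foldl]; omega
    rw [h01]
    exact streamA_zero M P _ 0 0 1 rfl
  · rw [if_neg hP]
    have h01 : ([0, 1].foldl (fun result num => if num > P then result * num else result) (1 : Int))
        = 1 := by
      simp [List.foldl]; omega
    rw [h01]
    by_cases h1 : (1 : Int) ≤ P
    · exact streamA_skip M P _ 0 1 (le_refl 0) one_pos h1
    · rw [streamA_mul M P _ 1 0 1 (le_refl 0) one_pos (by omega),
          fibSkipB_gt M P _ 0 1 (by omega)]
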